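-- pv_equiv track=rewrite | github.com/NickGroesch/kryptoSuite | kryptosuite/ciphers/scripts/columnarTranspositionCypher.py | getAlphabetialOrder
-- ===== SOURCE A (Python) =====
-- def getAlphabetialOrder(
--         keyString):  #TODO: include a scrambled alphabet for the keystring
--     import string
--     alphabet = list(string.ascii_lowercase)
--     itera = 0
--     charChange = False
--     word = list(keyString.lower())
--     for letter in alphabet:
--         for index, char in enumerate(word):
--             if char == letter:
--                 word[index] = itera
--                 charChange = True
--         if charChange:
--             itera += 1
--             charChange = False
--
--     return word
-- ===== SOURCE B (Python) =====
-- def getAlphabetialOrder(keyString):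
--     import string
--     word = list(keyString.lower())
--     letters = sorted(set(c for c in word if c in string.ascii_lowercase))
--     rank = {c: i for i, c in enumerate(letters)}
--     return [rank.get(c, c) for c in word]
-- ===== Notes on version B (the rewrite author's own statement) =====
-- stated objective: faster
-- what changed: A rescans the whole word once per alphabet letter (26 passes with in-place mutation and a change flag); B builds the sorted list of distinct letters present once, turns it into a rank dictionary, and maps the word through it in a single pass, removing the per-letter rescans (constant-factor: 1 pass + dict lookups instead of 26 passes).
-- outside the precondition, e.g. on getAlphabetialOrder('A b'): A returns [0, ' ', 1], B returns [0, ' ', 1]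
import Mathlib
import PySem

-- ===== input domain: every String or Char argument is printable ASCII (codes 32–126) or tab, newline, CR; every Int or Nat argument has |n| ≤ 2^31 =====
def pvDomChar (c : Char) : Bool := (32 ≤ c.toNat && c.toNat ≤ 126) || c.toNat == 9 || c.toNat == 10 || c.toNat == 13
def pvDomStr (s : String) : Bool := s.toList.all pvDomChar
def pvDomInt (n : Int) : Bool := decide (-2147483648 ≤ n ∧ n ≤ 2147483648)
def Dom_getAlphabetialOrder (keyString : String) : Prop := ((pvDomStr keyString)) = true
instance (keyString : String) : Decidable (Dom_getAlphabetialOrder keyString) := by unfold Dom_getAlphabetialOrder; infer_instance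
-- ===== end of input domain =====

-- B replaces A's 26 alphabet-by-word rescans with one sorted table of the distinct letters
-- present plus a dict lookup pass (objective: alternative / clearer single-pass strategy).
-- On non-letter characters Python (A and B alike) keeps the character itself in the list,
-- which is not a List Int value: Pre_ excludes those inputs. Both ports encode such a
-- leftover character as its code point, identically, so the ports agree everywhere.

-- ===== PORT A =====
-- list(string.ascii_lowercase)
def alphabetA : List Char := "abcdefghijklmnopqrstuvwxyz".toList

-- inner loop 'for index, char in enumerate(word): if char == letter: word[index] = itera; charChange = True'
-- (the mutated list is rebuilt structurally; chars already replaced are Sum.inr and never equal a letter)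
def innerA (letter : Char) (itera : Int) : List (Char ⊕ Int) → Bool → (List (Char ⊕ Int) × Bool)
  | [], ch => ([], ch)
  | x :: xs, ch =>
    match x with
    | Sum.inl c =>
      if c = letter then
        let r := innerA letter itera xs true
        (Sum.inr itera :: r.1, r.2)
      else
        let r := innerA letter itera xs ch
        (x :: r.1, r.2)
    | Sum.inr _ =>
      let r := innerA letter itera xs ch
      (x :: r.1, r.2)

-- outer loop 'for letter in alphabet: …; if charChange: itera += 1; charChange = False'
def outerA : List Char → List (Char ⊕ Int) → Int → List (Char ⊕ Int)
  | [], w, _ => w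
  | l :: ls, w, n =>
    let p := innerA l n w false
    if p.2 then outerA ls p.1 (n + 1) else outerA ls p.1 n

def getAlphabetialOrder (keyString : String) : List Int :=
  let word := (PySem.Str.lower keyString).toList.map Sum.inl
  (outerA alphabetA word 0).map (fun x => match x with
    | Sum.inr n => n
    | Sum.inl c => (c.toNat : Int))
  -- a never-replaced char stays the char itself in Python; it is encoded as its code
  -- point here (B's port uses the same encoding, so the agreement claim is unaffected)

-- ===== PORT B =====
-- string.ascii_lowercase (B's own copy)
def asciiLowercaseB : List Char := "abcdefghijklmnopqrstuvwxyz".toList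

def getAlphabetialOrder_alt (keyString : String) : List Int :=
  let word := (PySem.Str.lower keyString).toList
  -- letters = sorted(set(c for c in word if c in string.ascii_lowercase))
  -- ('c in string.ascii_lowercase' for a single char = membership among its chars, exact)
  let letters := PySem.List.sorted (PySem.Set.ofList (word.filter (fun c => asciiLowercaseB.contains c))) (fun x => x) false
  -- rank = {c: i for i, c in enumerate(letters)}
  let rank := (PySem.List.enumerate letters 0).foldl (fun d p => PySem.Dict.insert d p.2 p.1) PySem.Dict.empty
  -- [rank.get(c, c) for c in word]
  word.map (fun c => match PySem.Dict.get? rank c with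
    | some i => i
    | none => (c.toNat : Int))
  -- Python's rank.get(c, c) keeps the char itself when c is no letter; encoded as its
  -- code point, exactly as in A's port

-- ===== PRECONDITION & SPEC =====
-- Pre_ excludes keyStrings containing any non-alphabetic character: on those Python A
-- returns a MIXED list (the unreplaced characters stay one-char strings), which is not a
-- value of the declared return type List Int; B returns the same mixed list there.
def Pre_getAlphabetialOrder (keyString : String) : Prop :=
  keyString.toList.all
    (fun c => "abcdefghijklmnopqrstuvwxyzABCDEFGHIJKLMNOPQRSTUVWXYZ".toList.contains c) = true
instance (keyString : String) : Decidable (Pre_getAlphabetialOrder keyString) := by unfold Pre_getAlphabetialOrder; infer_instance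
def pvWitness_getAlphabetialOrder : String := "SecretKey"
def Spec_getAlphabetialOrder (keyString : String) (out : List Int) : Prop := out = getAlphabetialOrder_alt keyString
instance (keyString : String) (out : List Int) : Decidable (Spec_getAlphabetialOrder keyString out) := by unfold Spec_getAlphabetialOrder; infer_instance

-- ===== CLAIM (what is proved, stated in full; the proofs are below) =====
def Claim_equal_getAlphabetialOrder : Prop := ∀ (keyString : String), Dom_getAlphabetialOrder keyString → Pre_getAlphabetialOrder keyString → Spec_getAlphabetialOrder keyString (getAlphabetialOrder keyString)

-- ===== LEMMAS AND PROOFS =====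

-- number of letters of abc that are < c and occur in w (the value A assigns to c)
def cntRank (abc w : List Char) (c : Char) : Int :=
  ((abc.filter (fun l => decide (l < c) && w.contains l)).length : Int)

-- the inner loop acting on word = w.map h is the pointwise update, plus the change flag
theorem innerA_map (letter : Char) (n : Int) (h : Char → Char ⊕ Int) (w : List Char) (b : Bool) :
    innerA letter n (w.map h) b =
      (w.map (fun c => if h c = Sum.inl letter then Sum.inr n else h c),
       b || w.any (fun c => decide (h c = Sum.inl letter))) := by
  induction w generalizing b with
  | nil => simp [innerA]
  | cons c w ih =>
    simp only [List.map_cons]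
    cases hc : h c with
    | inl c' =>
      by_cases he : c' = letter
      · subst he
        simp [innerA, hc, ih, List.any_cons]
      · simp [innerA, hc, he, ih, List.any_cons]
    | inr k =>
      simp [innerA, hc, ih, List.any_cons]

theorem cntRank_cons (a : Char) (rest w : List Char) (c : Char) :
    cntRank (a :: rest) w c =
      (if a < c ∧ a ∈ w then 1 else 0) + cntRank rest w c := by
  simp only [cntRank, List.filter_cons]
  by_cases h1 : a < c <;> by_cases h2 : a ∈ w <;>
    simp [h1, h2] <;> push_cast <;> omega

theorem outerA_spec (abc : List Char) (w : List Char) :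
    ∀ (h : Char → Char ⊕ Int) (n : Int),
    abc.Pairwise (· < ·) →
    (∀ c ∈ w, c ∈ abc → h c = Sum.inl c) →
    (∀ c ∈ w, ∀ c', h c = Sum.inl c' → c' = c) →
    outerA abc (w.map h) n =
      w.map (fun c => if c ∈ abc then Sum.inr (n + cntRank abc w c) else h c) := by
  induction abc with
  | nil => intro h n _ _ _; simp [outerA]
  | cons a rest ih =>
    intro h n habc hh hinl
    rcases List.pairwise_cons.mp habc with ⟨ha, hrest⟩
    simp only [outerA, innerA_map, Bool.false_or]
    set h' : Char → Char ⊕ Int := fun c => if h c = Sum.inl a then Sum.inr n else h c with hh'def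
    have hh' : ∀ c ∈ w, c ∈ rest → h' c = Sum.inl c := by
      intro c hcw hcr
      have hne : c ≠ a := fun he => absurd (he ▸ ha c hcr) (lt_irrefl a)
      have := hh c hcw (List.mem_cons_of_mem _ hcr)
      simp only [hh'def, this]
      rw [if_neg (by simp [hne])]
    have hinl' : ∀ c ∈ w, ∀ c', h' c = Sum.inl c' → c' = c := by
      intro c hcw c' hc'
      simp only [hh'def] at hc'
      by_cases hca : h c = Sum.inl a
      · rw [if_pos hca] at hc'; exact absurd hc' (by simp)
      · rw [if_neg hca] at hc'; exact hinl c hcw c' hc'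
    have hanr : a ∉ rest := fun hmem => absurd (ha a hmem) (lt_irrefl a)
    by_cases haw : a ∈ w
    · have hflag : (w.any (fun c => decide (h c = Sum.inl a))) = true := by
        refine List.any_eq_true.mpr ⟨a, haw, ?_⟩
        simp [hh a haw List.mem_cons_self]
      rw [hflag, if_pos rfl, ih h' (n + 1) hrest hh' hinl']
      refine List.map_congr_left (fun c hcw => ?_)
      by_cases hca : c = a
      · subst hca
        rw [if_neg hanr, if_pos List.mem_cons_self]
        have hz : cntRank (c :: rest) w c = 0 := by
          simp only [cntRank]
          rw [List.filter_eq_nil_iff.mpr]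
          · rfl
          · intro l hl
            rcases List.mem_cons.mp hl with rfl | hl
            · simp
            · simp [not_lt_of_gt (ha l hl)]
        rw [hz, add_zero]
        simp only [hh'def]
        rw [hh c haw List.mem_cons_self, if_pos rfl]
      · by_cases hcr : c ∈ rest
        · rw [if_pos hcr, if_pos (List.mem_cons_of_mem _ hcr), cntRank_cons,
            if_pos ⟨ha c hcr, haw⟩]
          congr 1
          omega
        · have hnc : c ∉ a :: rest := by simp [hca, hcr]
          rw [if_neg hcr, if_neg hnc]
          simp only [hh'def]
          rw [if_neg (fun hc' => hca (hinl c hcw a hc').symm)]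
    · have hflag : (w.any (fun c => decide (h c = Sum.inl a))) = false := by
        rw [List.any_eq_false]
        intro c hcw
        simp only [decide_eq_true_eq]
        intro hc'
        exact haw ((hinl c hcw a hc') ▸ hcw)
      rw [hflag, if_neg (by simp), ih h' n hrest hh' hinl']
      refine List.map_congr_left (fun c hcw => ?_)
      have hca : c ≠ a := fun he => haw (he ▸ hcw)
      by_cases hcr : c ∈ rest
      · rw [if_pos hcr, if_pos (List.mem_cons_of_mem _ hcr), cntRank_cons,
          if_neg (fun hp => haw hp.2), zero_add]
      · have hnc : c ∉ a :: rest := by simp [hca, hcr]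
        rw [if_neg hcr, if_neg hnc]
        simp only [hh'def]
        rw [if_neg (fun hc' => hca (hinl c hcw a hc').symm)]

theorem get?_fold_ins_not_mem (L : List (Int × Char)) (d : PySem.Dict Char Int) (c : Char)
    (hc : ∀ p ∈ L, p.2 ≠ c) :
    PySem.Dict.get? (L.foldl (fun d p => PySem.Dict.insert d p.2 p.1) d) c = d.get? c := by
  induction L generalizing d with
  | nil => rfl
  | cons p L ih =>
    simp only [List.foldl_cons]
    rw [ih _ (fun q hq => hc q (List.mem_cons_of_mem _ hq)),
      PySem.Dict.get?_insert_of_ne _ _ (Ne.symm (hc p (List.mem_cons_self)))]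

theorem get?_rank (S : List Char) (hp : S.Pairwise (· < ·)) :
    ∀ (s : Int) (d : PySem.Dict Char Int) (c : Char), c ∈ S →
    PySem.Dict.get? ((PySem.List.enumerate S s).foldl (fun d p => PySem.Dict.insert d p.2 p.1) d) c
      = some (s + ((S.filter (fun l => decide (l < c))).length : Int)) := by
  induction S with
  | nil => intro s d c hc; cases hc
  | cons x rest ih =>
    rcases List.pairwise_cons.mp hp with ⟨hx, hrest⟩
    intro s d c hc
    rw [PySem.List.enumerate_cons, List.foldl_cons]
    rcases List.mem_cons.mp hc with rfl | hcr
    · rw [get?_fold_ins_not_mem]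
      · have hz : ((c :: rest).filter (fun l => decide (l < c))) = [] := by
          rw [List.filter_eq_nil_iff]
          intro l hl
          rcases List.mem_cons.mp hl with rfl | hl
          · simp
          · simp [not_lt_of_gt (hx l hl)]
        rw [hz, PySem.Dict.get?_insert_self]
        norm_num
      · intro p hp'
        have : p.2 ∈ rest := by
          have := PySem.List.map_snd_enumerate rest (s + 1)
          exact this ▸ List.mem_map_of_mem hp'
        exact fun he => absurd (he ▸ hx _ this) (lt_irrefl c)
    · rw [ih hrest (s + 1) _ c hcr]
      have hf : ((x :: rest).filter (fun l => decide (l < c))) =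
          x :: rest.filter (fun l => decide (l < c)) := by
        rw [List.filter_cons, if_pos (by simp [hx c hcr])]
      rw [hf]
      congr 1
      push_cast [List.length_cons]
      ring

theorem cnt_eq (w : List Char) (c : Char) :
    cntRank "abcdefghijklmnopqrstuvwxyz".toList w c =
      (((PySem.List.sorted
          (PySem.Set.ofList (w.filter (fun l => "abcdefghijklmnopqrstuvwxyz".toList.contains l)))
          (fun x => x) false).filter (fun l => decide (l < c))).length : Int) := by
  set F : List Char := w.filter (fun l => "abcdefghijklmnopqrstuvwxyz".toList.contains l) with hF
  have hperm : (PySem.List.sorted (PySem.Set.ofList F) (fun x => x) false).Perm (PySem.Set.ofList F) :=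
    PySem.List.sorted_perm _ _ _
  have h1 : ((PySem.List.sorted (PySem.Set.ofList F) (fun x => x) false).filter
      (fun l => decide (l < c))).length = ((PySem.Set.ofList F).filter (fun l => decide (l < c))).length :=
    (hperm.filter _).length_eq
  have h2 : ("abcdefghijklmnopqrstuvwxyz".toList.filter (fun l => decide (l < c) && w.contains l)).Perm
      ((PySem.Set.ofList F).filter (fun l => decide (l < c))) := by
    rw [List.perm_ext_iff_of_nodup (List.Nodup.filter _ (by decide))
      (List.Nodup.filter _ (PySem.Set.nodup_ofList F))]
    intro l
    simp only [hF, List.mem_filter, Bool.and_eq_true, decide_eq_true_eq, List.contains_iff_mem,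
      PySem.Set.mem_ofList]
    constructor
    · rintro ⟨hla, hlc, hlw⟩; exact ⟨⟨hlw, hla⟩, hlc⟩
    · rintro ⟨⟨hlw, hla⟩, hlc⟩; exact ⟨hla, hlc, hlw⟩
  rw [cntRank, h1, h2.length_eq]

-- ===== VERDICT (by name: the statement is the Claim_ definition above) =====
theorem getAlphabetialOrder_spec : Claim_equal_getAlphabetialOrder := by
  intro ks _hdom _hpre
  show getAlphabetialOrder ks = getAlphabetialOrder_alt ks
  set w : List Char := (PySem.Str.lower ks).toList with hwdef
  have hS := PySem.List.sorted_ofList_pairwise_lt (κ := Char)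
    (w.filter (fun l => asciiLowercaseB.contains l))
  simp only [getAlphabetialOrder, getAlphabetialOrder_alt]
  rw [outerA_spec alphabetA w Sum.inl 0 (by decide)
    (fun _ _ _ => rfl) (fun _ _ _ h => (Sum.inl.inj h).symm), List.map_map]
  refine List.map_congr_left (fun c hc => ?_)
  by_cases hca : c ∈ alphabetA
  · have hcS : c ∈ PySem.List.sorted
        (PySem.Set.ofList (w.filter (fun l => asciiLowercaseB.contains l))) (fun x => x) false :=
      (PySem.List.sorted_perm _ _ _).mem_iff.mpr ((PySem.Set.mem_ofList _ c).mpr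
        (List.mem_filter.mpr ⟨hc, by simp only [List.contains_iff_mem]; exact hca⟩))
    rw [get?_rank _ hS 0 PySem.Dict.empty c hcS]
    simp only [Function.comp_apply, hca, if_pos, zero_add]
    exact cnt_eq w c
  · have hnone : PySem.Dict.get?
        ((PySem.List.enumerate (PySem.List.sorted
          (PySem.Set.ofList (w.filter (fun l => asciiLowercaseB.contains l))) (fun x => x) false) 0).foldl
          (fun d p => PySem.Dict.insert d p.2 p.1) PySem.Dict.empty) c = none := by
      rw [get?_fold_ins_not_mem _ _ _ ?_, PySem.Dict.get?_empty]
      intro p hp he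
      have h2 : p.2 ∈ PySem.List.sorted
          (PySem.Set.ofList (w.filter (fun l => asciiLowercaseB.contains l))) (fun x => x) false := by
        have := PySem.List.map_snd_enumerate (PySem.List.sorted
          (PySem.Set.ofList (w.filter (fun l => asciiLowercaseB.contains l))) (fun x => x) false) 0
        exact this ▸ List.mem_map_of_mem hp
      have h3 := (List.mem_filter.mp (((PySem.Set.mem_ofList _ _).mp
        ((PySem.List.sorted_perm _ _ _).mem_iff.mp h2)))).2
      rw [he] at h3
      simp only [List.contains_iff_mem] at h3
      exact hca h3
    rw [hnone]
    simp [hca]
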